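-- pv_equiv track=rewrite | github.com/hiroto0227/att-chemdner-pytorch | scripts/tobatch.py | list2batch_char
-- ===== SOURCE A (Python) =====
-- def list2batch_char(mylist):
--     max_ele = 0
--     max_l = 0
--     for ele in mylist:
--         for _ele in ele:
--             if max_ele < len(_ele):
--                 max_ele = len(_ele)
--         if max_l < len(ele):
--             max_l = len(ele)
--     new_list = []
--     ele_list = []
--     for ele in mylist:
--         for _ele in ele:
--             diff = max_ele - len(_ele)
--             a = _ele + [0] * diff
--             ele_list.append(a)
--         new_list.append(ele_list)
--         ele_list = []
--     out_list = []
--     for ele in range(max_l):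
--         dmy = []
--         for e in range(len(new_list)):
--             if len(new_list[e]) > ele:
--                 dmy.append(new_list[e][ele])
--             else:
--                 dmy.append([0] * max_ele)
--         out_list.append(dmy)
--     return out_list
-- ===== SOURCE B (Python) =====
-- def list2batch_char(mylist):
--     max_ele = max((len(w) for s in mylist for w in s), default=0)
--     steps = max(map(len, mylist), default=0)
--     out = []
--     rest = list(mylist)
--     for _ in range(steps):
--         out.append([s[0] + [0] * (max_ele - len(s[0])) if s else [0] * max_ele
--                     for s in rest])
--         rest = [s[1:] for s in rest]
--     return out
-- ===== Notes on version B (the rewrite author's own statement) =====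
-- stated objective: alternative
-- what changed: B replaces A's pad-everything-then-index-transpose (three staged passes with an intermediate row-major padded matrix) by a head-peeling transposition: it keeps a list of remaining suffixes of the sentences and, for each time step, pads and emits each sentence's current head (or a zero word when exhausted) and drops it, so no intermediate padded matrix and no indexing exist.
import Mathlib
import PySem

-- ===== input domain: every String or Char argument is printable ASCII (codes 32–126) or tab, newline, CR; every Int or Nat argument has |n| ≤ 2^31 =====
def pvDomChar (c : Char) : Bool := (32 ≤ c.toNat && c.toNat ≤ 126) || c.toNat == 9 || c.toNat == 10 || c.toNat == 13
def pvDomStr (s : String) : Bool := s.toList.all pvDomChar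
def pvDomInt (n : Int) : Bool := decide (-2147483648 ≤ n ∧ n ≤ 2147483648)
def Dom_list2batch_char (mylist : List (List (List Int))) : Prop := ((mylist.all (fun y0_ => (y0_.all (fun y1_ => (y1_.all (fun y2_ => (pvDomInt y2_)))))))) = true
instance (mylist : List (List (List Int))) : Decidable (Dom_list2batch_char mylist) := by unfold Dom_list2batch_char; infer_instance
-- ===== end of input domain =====

-- B replaces A's pad-all-then-index-transpose (with an intermediate padded matrix) by a
-- head-peeling transposition over shrinking suffixes, with no intermediate matrix and no
-- indexing; same asymptotic cost (objective: alternative).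

-- ===== PORT A =====
-- literal transliteration of A: two accumulating max loops, a padding pass building new_list,
-- then an index loop over range(max_l) × range(len(new_list)); indexing is via pyGetD, exact here
-- because every index produced by range is nonnegative and guarded in range.
def list2batch_char (mylist : List (List (List Int))) : List (List (List Int)) :=
  let p : Int × Int := mylist.foldl (fun p ele =>
      (ele.foldl (fun m r => if m < (r.length : Int) then (r.length : Int) else m) p.1,
       if p.2 < (ele.length : Int) then (ele.length : Int) else p.2)) (0, 0)
  let maxEle := p.1
  let maxL := p.2
  let newList : List (List (List Int)) := mylist.foldl (fun nl ele =>
      nl ++ [ele.foldl (fun el r =>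
        el ++ [r ++ List.replicate (maxEle - (r.length : Int)).toNat 0]) []]) []
  (PySem.List.pyRange 0 maxL 1).foldl (fun out i =>
      out ++ [(PySem.List.pyRange 0 (newList.length : Int) 1).foldl (fun dmy e =>
        let row := PySem.List.pyGetD newList e []
        if i < (row.length : Int) then dmy ++ [PySem.List.pyGetD row i []]
        else dmy ++ [List.replicate maxEle.toNat 0]) []]) []

-- ===== PORT B =====
-- literal transliteration of B: maxima via max folds over mapped lengths, then a fuel
-- recursion ('for _ in range(steps)') that pads and emits each sentence's current head
-- (a zero word when the sentence is exhausted) and drops it ('rest = [s[1:] for s in rest]').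
def pvPad (maxEle : Int) (w : List Int) : List Int :=
  w ++ List.replicate (maxEle - (w.length : Int)).toNat 0

def pvPeel (maxEle : Int) : Nat → List (List (List Int)) → List (List (List Int))
  | 0, _ => []
  | k + 1, rest =>
      (rest.map (fun s => match s with
        | [] => List.replicate maxEle.toNat 0
        | w :: _ => pvPad maxEle w))
      :: pvPeel maxEle k (rest.map (fun s => s.drop 1))

def list2batch_char_alt (mylist : List (List (List Int))) : List (List (List Int)) :=
  let maxEle : Int := ((mylist.flatMap (fun s => s)).map (fun w => (w.length : Int))).foldl max 0
  let steps : Nat := (mylist.map (fun s => s.length)).foldl max 0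
  pvPeel maxEle steps mylist

-- ===== PRECONDITION & SPEC =====
def Spec_list2batch_char (mylist : List (List (List Int))) (out : List (List (List Int))) : Prop := out = list2batch_char_alt mylist
instance (mylist : List (List (List Int))) (out : List (List (List Int))) : Decidable (Spec_list2batch_char mylist out) := by unfold Spec_list2batch_char; infer_instance

-- ===== CLAIM (what is proved, stated in full; the proofs are below) =====
def Claim_equal_list2batch_char : Prop := ∀ (mylist : List (List (List Int))), Dom_list2batch_char mylist → Spec_list2batch_char mylist (list2batch_char mylist)

-- ===== LEMMAS AND PROOFS =====
-- common indexed normal form both ports are reduced to (proof-only helper)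
def pvIndexed (mylist : List (List (List Int))) : List (List (List Int)) :=
  let maxEle : Int := ((mylist.flatMap (fun e => e)).map (fun r => (r.length : Int))).foldl max 0
  let maxL : Int := (mylist.map (fun e => (e.length : Int))).foldl max 0
  (List.range maxL.toNat).map (fun i =>
    (List.range mylist.length).map (fun e =>
      let ele := mylist.getD e []
      if i < ele.length then
        (ele.getD i []) ++ List.replicate (maxEle - ((ele.getD i []).length : Int)).toNat 0
      else List.replicate maxEle.toNat 0))

theorem if_lt_max (m x : Int) : (if m < x then x else m) = max m x := by
  split <;> omega

theorem ite_append {α : Type} (c : Prop) [Decidable c] (a : List α) (x y : α) :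
    (if c then a ++ [x] else a ++ [y]) = a ++ [if c then x else y] := by
  split <;> rfl

theorem pairfold (l : List (List (List Int))) (a b : Int) :
    l.foldl (fun p ele =>
      (ele.foldl (fun m r => max m ((r.length : Int))) p.1,
       max p.2 ((ele.length : Int)))) (a, b)
    = (l.foldl (fun m ele => ele.foldl (fun m r => max m ((r.length : Int))) m) a,
       l.foldl (fun m ele => max m ((ele.length : Int))) b) := by
  induction l generalizing a b with
  | nil => rfl
  | cons x xs ih => simp [List.foldl_cons, ih]

theorem maxele_eq (l : List (List (List Int))) (a : Int) :
    l.foldl (fun m ele => ele.foldl (fun m r => max m ((r.length : Int))) m) a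
    = ((l.flatMap (fun e => e)).map (fun r => (r.length : Int))).foldl max a := by
  induction l generalizing a with
  | nil => rfl
  | cons x xs ih => simp [List.flatMap_cons, List.foldl_append, ih, List.foldl_map]

theorem getD_map_of_lt {α β : Type} (f : α → β) (l : List α) (k : ℕ) (h : k < l.length)
    (d : β) (d' : α) : (l.map f).getD k d = f (l.getD k d') := by
  simp [List.getD_eq_getElem?_getD, List.getElem?_eq_getElem h,
    List.getElem?_eq_getElem (by simpa using h : k < (l.map f).length)]

theorem A_eq_indexed (mylist : List (List (List Int))) :
    list2batch_char mylist = pvIndexed mylist := by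
  unfold list2batch_char pvIndexed
  simp only [if_lt_max, pairfold, maxele_eq, List.foldl_map]
  simp only [PySem.List.foldl_append_singleton_eq_map, List.nil_append, ite_append,
    PySem.List.pyRange_one, Int.sub_zero, List.map_map]
  simp only [List.length_map, Int.toNat_natCast]
  apply List.map_congr_left
  intro k _
  simp only [Function.comp_apply, zero_add]
  apply List.map_congr_left
  intro e he
  have he' : e < mylist.length := List.mem_range.mp he
  simp only [Function.comp_apply, PySem.List.pyGetD_natCast]
  rw [getD_map_of_lt _ mylist e he' [] []]
  simp only [List.length_map, Nat.cast_lt]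
  split_ifs with h
  · rw [getD_map_of_lt _ _ k h [] []]
  · rfl

theorem cast_foldl_max (l : List (List (List Int))) (a : ℕ) :
    l.foldl (fun m ele => max m ((ele.length : Int))) (a : Int)
      = (((l.map (fun s => s.length)).foldl max a : ℕ) : Int) := by
  induction l generalizing a with
  | nil => rfl
  | cons x xs ih => simp [List.foldl_cons, ← Nat.cast_max, ih]

theorem peel_eq (me : Int) (m : ℕ) (rest : List (List (List Int))) :
    pvPeel me m rest = (List.range m).map (fun i =>
      rest.map (fun s =>
        if i < s.length then pvPad me (s.getD i []) else List.replicate me.toNat 0)) := by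
  induction m generalizing rest with
  | zero => rfl
  | succ k ih =>
    rw [List.range_succ_eq_map, List.map_cons, pvPeel, ih, List.map_map]
    congr 1
    · apply List.map_congr_left
      intro s _
      cases s <;> simp
    · apply List.map_congr_left
      intro i _
      simp only [Function.comp_apply, List.map_map]
      apply List.map_congr_left
      intro s _
      cases s with
      | nil => simp
      | cons w t => simp

theorem map_getD_range {α β : Type} (f : α → β) (l : List α) (d : α) :
    (List.range l.length).map (fun e => f (l.getD e d)) = l.map f := by
  apply List.ext_getElem
  · simp
  · intro i h1 h2
    have h : i < l.length := by simpa using h2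
    simp [List.getD_eq_getElem?_getD, List.getElem?_eq_getElem h]

theorem alt_eq_indexed (mylist : List (List (List Int))) :
    list2batch_char_alt mylist = pvIndexed mylist := by
  unfold list2batch_char_alt pvIndexed
  rw [show ((mylist.map (fun e => (e.length : Int))).foldl max 0)
        = mylist.foldl (fun m ele => max m ((ele.length : Int))) ((0 : ℕ) : Int)
      by simp [List.foldl_map]]
  rw [cast_foldl_max]
  simp only [Int.toNat_natCast, peel_eq]
  apply List.map_congr_left
  intro i _
  rw [← map_getD_range (fun s =>
        if i < s.length then pvPad _ (s.getD i []) else List.replicate _ 0) mylist []]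
  apply List.map_congr_left
  intro e _
  simp [pvPad]

theorem main_eq (mylist : List (List (List Int))) :
    list2batch_char mylist = list2batch_char_alt mylist := by
  rw [A_eq_indexed, alt_eq_indexed]

-- ===== VERDICT (by name: the statement is the Claim_ definition above) =====
theorem list2batch_char_spec : Claim_equal_list2batch_char := by
  intro mylist _
  unfold Spec_list2batch_char
  exact main_eq mylist
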